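-- pv_equiv track=rewrite | github.com/rafse/norma-ntc | scripts/cda.py | merge_pixels_to_rects
-- ===== SOURCE A (Python) =====
-- def merge_pixels_to_rects(pixels_coords):
--     """
--     Algoritmo Greedy per fondere pixel adiacenti in rettangoli.
--     """
--     rects = []
--     # Usiamo un set per una ricerca rapida dei pixel disponibili
--     unvisited = set(pixels_coords)
--
--     while unvisited:
--         # Prendi il primo pixel disponibile (top-left)
--         x, y = min(unvisited, key=lambda p: (p[1], p[0]))
--
--         # Estendi il rettangolo in larghezza (W)
--         w = 1
--         while (x + w, y) in unvisited:
--             w += 1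
--
--         # Estendi il rettangolo in altezza (H)
--         h = 1
--         while True:
--             # Controlla se l'intera riga successiva di larghezza W è presente
--             all_row_present = True
--             for dx in range(w):
--                 if (x + dx, y + h) not in unvisited:
--                     all_row_present = False
--                     break
--             if all_row_present:
--                 h += 1
--             else:
--                 break
--
--         # Abbiamo trovato un rettangolo di W x H. Rimuovilo dai non visitati.
--         for dy in range(h):
--             for dx in range(w):
--                 unvisited.remove((x + dx, y + dy))
--
--         rects.append((x, y, w, h))
--     return rects
-- ===== SOURCE B (Python) =====
-- def merge_pixels_to_rects(pixels_coords):
--     """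
--     Greedy merge of pixels into rectangles: sort the distinct pixels once by
--     (y, x); the first still-alive pixel in that order is always the next
--     greedy anchor, so the repeated min() scan over the whole set disappears.
--     """
--     pts = sorted(set(pixels_coords), key=lambda p: (p[1], p[0]))
--     alive = set(pts)
--     rects = []
--     for p in pts:
--         if p not in alive:
--             continue
--         x, y = p
--         w = 1
--         while (x + w, y) in alive:
--             w += 1
--         h = 1
--         while all((x + dx, y + h) in alive for dx in range(w)):
--             h += 1
--         alive.difference_update((x + dx, y + dy) for dy in range(h) for dx in range(w))
--         rects.append((x, y, w, h))
--     return rects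
-- ===== Notes on version B (the rewrite author's own statement) =====
-- stated objective: faster
-- what changed: A rescans the whole remaining pixel set with min() to find each rectangle's anchor; B sorts the distinct pixels once by (y, x) and walks that list with a pointer, skipping pixels already swallowed by earlier rectangles, so the per-rectangle min() scan disappears.
import Mathlib
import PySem

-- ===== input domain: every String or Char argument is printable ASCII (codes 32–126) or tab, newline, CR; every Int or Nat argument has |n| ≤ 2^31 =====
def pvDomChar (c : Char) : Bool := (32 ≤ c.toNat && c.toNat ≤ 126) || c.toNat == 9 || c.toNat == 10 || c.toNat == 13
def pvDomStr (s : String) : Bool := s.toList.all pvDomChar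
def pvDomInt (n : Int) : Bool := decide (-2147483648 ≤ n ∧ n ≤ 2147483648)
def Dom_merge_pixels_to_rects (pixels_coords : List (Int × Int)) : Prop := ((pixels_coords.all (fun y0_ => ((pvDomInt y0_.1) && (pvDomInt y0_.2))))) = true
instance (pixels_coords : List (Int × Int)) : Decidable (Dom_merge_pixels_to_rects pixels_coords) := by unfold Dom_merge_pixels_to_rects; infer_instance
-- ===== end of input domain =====

-- B replaces A's repeated min() scan over the remaining set by one sort of the distinct
-- pixels by (y, x) and a single pointer pass that skips already-removed pixels (objective:
-- faster on inputs that decompose into many rectangles).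

-- Lemmas cited by the ports' termination proofs (decreasing_by) — above the ports for that reason.

lemma pv_countP_lt {α : Type} (p q : α → Bool) (himp : ∀ a, p a = true → q a = true)
    (l : List α) (a : α) (ha : a ∈ l) (hqa : q a = true) (hpa : p a = false) :
    l.countP p < l.countP q := by
  induction l with
  | nil => cases ha
  | cons b t ih =>
    have hmono : t.countP p ≤ t.countP q := List.countP_mono_left (fun x _ => himp x)
    rw [List.countP_cons, List.countP_cons]
    rcases List.mem_cons.mp ha with rfl | hb
    · rw [if_neg (by simp [hpa]), if_pos hqa]; omega
    · have := ih hb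
      by_cases hpb : p b = true
      · rw [if_pos hpb, if_pos (himp b hpb)]; omega
      · rw [if_neg hpb]
        by_cases hqb : q b = true
        · rw [if_pos hqb]; omega
        · rw [if_neg hqb]; omega

lemma pv_foldl_and_eq {α : Type} (p : α → Bool) (l : List α) (b : Bool) :
    l.foldl (fun acc x => acc && p x) b = (b && l.all p) := by
  induction l generalizing b with
  | nil => simp
  | cons x t ih => simp [List.foldl_cons, ih, Bool.and_assoc]

-- the fold step of min(..., key=lambda p: (p[1], p[0])) (= PySem.List.min2?'s fold function)
def pvStep (acc : Option (Int × Int)) (x : Int × Int) : Option (Int × Int) :=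
  match acc with
  | none => some x
  | some m => if (decide (x.2 < m.2) || !decide (m.2 < x.2) && decide (x.1 < m.1)) = true then some x else some m

lemma pv_min2?_eq_foldl (u : List (Int × Int)) :
    PySem.List.min2? u (fun r => r.2) (fun r => r.1) = u.foldl pvStep none := by
  unfold PySem.List.min2?
  congr 1
  funext acc x
  cases acc <;> rfl

lemma pv_foldl_pvStep_mem (l : List (Int × Int)) :
    ∀ (acc : Option (Int × Int)) (m : Int × Int),
      l.foldl pvStep acc = some m → acc = some m ∨ m ∈ l := by
  induction l with
  | nil => intro acc m h; exact Or.inl h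
  | cons x t ih =>
    intro acc m h
    rw [List.foldl_cons] at h
    rcases ih _ m h with h' | h'
    · cases acc with
      | none =>
        right
        have hx : x = m := by simpa [pvStep] using h'
        simp [hx]
      | some m' =>
        simp only [pvStep] at h'
        split at h'
        · right; rw [Option.some.injEq] at h'; simp [← h']
        · left; exact h'
    · right; exact List.mem_cons_of_mem _ h'

lemma pv_min2?_mem (u : List (Int × Int)) (m : Int × Int)
    (h : PySem.List.min2? u (fun r => r.2) (fun r => r.1) = some m) : m ∈ u := by
  rw [pv_min2?_eq_foldl] at h
  rcases pv_foldl_pvStep_mem u none m h with h' | h'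
  · cases h'
  · exact h'

lemma pv_length_foldl_discard_le (l : List (Int × Int)) :
    ∀ u : PySem.Set (Int × Int), (l.foldl PySem.Set.discard u).length ≤ u.length := by
  induction l with
  | nil => intro u; simp
  | cons b t ih =>
    intro u
    calc (List.foldl PySem.Set.discard (PySem.Set.discard u b) t).length
        ≤ (PySem.Set.discard u b).length := ih _
      _ ≤ u.length := List.length_filter_le _ _

lemma pv_length_foldl_discard_lt (l : List (Int × Int)) (a : Int × Int) :
    ∀ u : PySem.Set (Int × Int), a ∈ l → a ∈ u →
      (l.foldl PySem.Set.discard u).length < u.length := by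
  induction l with
  | nil => intro u ha; cases ha
  | cons b t ih =>
    intro u ha hau
    by_cases hab : a = b
    · subst hab
      have h1 : (PySem.Set.discard u a).length < u.length := by
        apply List.length_filter_lt_length_iff_exists.mpr
        exact ⟨a, hau, by simp⟩
      exact lt_of_le_of_lt (pv_length_foldl_discard_le t _) h1
    · have ha' : a ∈ t := by
        rcases List.mem_cons.mp ha with h | h
        · exact absurd h hab
        · exact h
      have hmem : a ∈ PySem.Set.discard u b := (PySem.Set.mem_discard u b a).mpr ⟨hau, hab⟩
      exact lt_of_lt_of_le (ih _ ha' hmem) (List.length_filter_le _ _)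

-- ===== PORT A =====
-- while (x + w, y) in unvisited: w += 1
def aWidth (u : PySem.Set (Int × Int)) (x y w : Int) : Int :=
  if PySem.Set.contains u (x + w, y) then aWidth u x y (w + 1) else w
termination_by u.countP (fun q => decide (q.2 = y ∧ x + w ≤ q.1))
decreasing_by
  have hm : (x + w, y) ∈ u := (PySem.Set.contains_iff u _).mp ‹_›
  exact pv_countP_lt _ _ (fun a => by simp; omega) u (x + w, y) hm
    (by simp) (by simp)

-- the h-loop; all_row_present is the for/break flag fold; '0 < w' is only a totality guard
-- (with w ≤ 0 the Python loop would never stop; this is unreachable since aWidth returns ≥ 1)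
def aHeight (u : PySem.Set (Int × Int)) (x y w h : Int) : Int :=
  if 0 < w ∧ ((PySem.List.pyRange 0 w).foldl
      (fun acc dx => acc && PySem.Set.contains u (x + dx, y + h)) true = true) then
    aHeight u x y w (h + 1)
  else h
termination_by u.countP (fun q => decide (q.1 = x ∧ y + h ≤ q.2))
decreasing_by
  rename_i hcond
  obtain ⟨hw, hrow⟩ := hcond
  rw [pv_foldl_and_eq, Bool.true_and] at hrow
  have h0 : (0 : Int) ∈ PySem.List.pyRange 0 w := PySem.List.mem_pyRange_one.mpr (by omega)
  have hc := List.all_eq_true.mp hrow 0 h0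
  have hm : (x + 0, y + h) ∈ u := (PySem.Set.contains_iff u _).mp hc
  rw [show x + 0 = x from by omega] at hm
  exact pv_countP_lt _ _ (fun a => by simp; omega) u (x, y + h) hm
    (by simp) (by simp)

-- the nested removal loops; Python's set.remove always succeeds here (every pixel of the
-- rectangle was verified present before), so Set.discard is exact
def aRemove (u : PySem.Set (Int × Int)) (x y w h : Int) : PySem.Set (Int × Int) :=
  (PySem.List.pyRange 0 h).foldl
    (fun s dy => (PySem.List.pyRange 0 w).foldl (fun s dx => PySem.Set.discard s (x + dx, y + dy)) s) u

lemma pv_aRemove_eq (u : PySem.Set (Int × Int)) (x y w h : Int) :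
    aRemove u x y w h =
      ((PySem.List.pyRange 0 h).flatMap
        (fun dy => (PySem.List.pyRange 0 w).map (fun dx => (x + dx, y + dy)))).foldl
        PySem.Set.discard u := by
  rw [List.foldl_flatMap]
  unfold aRemove
  simp [List.foldl_map]

lemma pv_aWidth_ge (u : PySem.Set (Int × Int)) (x y w : Int) : w ≤ aWidth u x y w := by
  fun_induction aWidth u x y w with
  | case1 w hc ih => omega
  | case2 w hc => omega

lemma pv_aHeight_ge (u : PySem.Set (Int × Int)) (x y w h : Int) : h ≤ aHeight u x y w h := by
  fun_induction aHeight u x y w h with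
  | case1 h hc ih => omega
  | case2 h hc => omega

lemma pv_aRemove_lt (u : PySem.Set (Int × Int)) (x y w h : Int)
    (hw : 1 ≤ w) (hh : 1 ≤ h) (hm : (x, y) ∈ u) :
    (aRemove u x y w h).length < u.length := by
  rw [pv_aRemove_eq]
  apply pv_length_foldl_discard_lt _ (x, y) u _ hm
  rw [List.mem_flatMap]
  refine ⟨0, PySem.List.mem_pyRange_one.mpr (by omega), ?_⟩
  rw [List.mem_map]
  exact ⟨0, PySem.List.mem_pyRange_one.mpr (by omega), by simp⟩

-- while unvisited: take min (key = (y, x)), grow the rectangle, remove it, append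
def aLoop (u : PySem.Set (Int × Int)) (rects : List (Int × Int × Int × Int)) :
    List (Int × Int × Int × Int) :=
  if u = [] then rects
  else
    match hm : PySem.List.min2? u (fun r => r.2) (fun r => r.1) with
    | none => rects
    | some (x, y) =>
      let w := aWidth u x y 1
      let h := aHeight u x y w 1
      aLoop (aRemove u x y w h) (rects ++ [(x, y, w, h)])
termination_by u.length
decreasing_by
  have hmem : (x, y) ∈ u := pv_min2?_mem u _ hm
  exact pv_aRemove_lt u x y _ _ (pv_aWidth_ge u x y 1) (pv_aHeight_ge u x y _ 1) hmem

def merge_pixels_to_rects (pixels_coords : List (Int × Int)) : List (Int × Int × Int × Int) :=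
  aLoop (PySem.Set.ofList pixels_coords) []

-- ===== PORT B =====
def bWidth (alive : PySem.Set (Int × Int)) (x y w : Int) : Int :=
  if PySem.Set.contains alive (x + w, y) then bWidth alive x y (w + 1) else w
termination_by alive.countP (fun q => decide (q.2 = y ∧ x + w ≤ q.1))
decreasing_by
  have hm : (x + w, y) ∈ alive := (PySem.Set.contains_iff alive _).mp ‹_›
  exact pv_countP_lt _ _ (fun a => by simp; omega) alive (x + w, y) hm
    (by simp) (by simp)

-- while all(...): h += 1  ('0 < w' is only a totality guard, as in aHeight)
def bHeight (alive : PySem.Set (Int × Int)) (x y w h : Int) : Int :=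
  if 0 < w ∧ ((PySem.List.pyRange 0 w).all
      (fun dx => PySem.Set.contains alive (x + dx, y + h)) = true) then
    bHeight alive x y w (h + 1)
  else h
termination_by alive.countP (fun q => decide (q.1 = x ∧ y + h ≤ q.2))
decreasing_by
  rename_i hcond
  obtain ⟨hw, hrow⟩ := hcond
  have h0 : (0 : Int) ∈ PySem.List.pyRange 0 w := PySem.List.mem_pyRange_one.mpr (by omega)
  have hc := List.all_eq_true.mp hrow 0 h0
  have hm : (x + 0, y + h) ∈ alive := (PySem.Set.contains_iff alive _).mp hc
  rw [show x + 0 = x from by omega] at hm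
  exact pv_countP_lt _ _ (fun a => by simp; omega) alive (x, y + h) hm
    (by simp) (by simp)

-- alive.difference_update(generator of the rectangle's pixels)
def bRemove (alive : PySem.Set (Int × Int)) (x y w h : Int) : PySem.Set (Int × Int) :=
  ((PySem.List.pyRange 0 h).flatMap
    (fun dy => (PySem.List.pyRange 0 w).map (fun dx => (x + dx, y + dy)))).foldl
    PySem.Set.discard alive

-- for p in pts: if p alive, grow a rectangle anchored at p and kill its pixels
def bLoop (pts : List (Int × Int)) (alive : PySem.Set (Int × Int))
    (rects : List (Int × Int × Int × Int)) : List (Int × Int × Int × Int) :=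
  match pts with
  | [] => rects
  | p :: rest =>
    if PySem.Set.contains alive p then
      let w := bWidth alive p.1 p.2 1
      let h := bHeight alive p.1 p.2 w 1
      bLoop rest (bRemove alive p.1 p.2 w h) (rects ++ [(p.1, p.2, w, h)])
    else bLoop rest alive rects

def merge_pixels_to_rects_alt (pixels_coords : List (Int × Int)) : List (Int × Int × Int × Int) :=
  let pts := PySem.List.sorted2 (PySem.Set.ofList pixels_coords) (fun p => p.2) (fun p => p.1)
  bLoop pts (PySem.Set.ofList pts) []

-- ===== PRECONDITION & SPEC =====
def Spec_merge_pixels_to_rects (pixels_coords : List (Int × Int)) (out : List (Int × Int × Int × Int)) : Prop := out = merge_pixels_to_rects_alt pixels_coords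
instance (pixels_coords : List (Int × Int)) (out : List (Int × Int × Int × Int)) : Decidable (Spec_merge_pixels_to_rects pixels_coords out) := by unfold Spec_merge_pixels_to_rects; infer_instance

-- ===== CLAIM (what is proved, stated in full; the proofs are below) =====
def Claim_equal_merge_pixels_to_rects : Prop := ∀ (pixels_coords : List (Int × Int)), Dom_merge_pixels_to_rects pixels_coords → Spec_merge_pixels_to_rects pixels_coords (merge_pixels_to_rects pixels_coords)

-- ===== LEMMAS AND PROOFS =====

-- strict "reading order": smaller y first, then smaller x
def pvLL (p q : Int × Int) : Prop := p.2 < q.2 ∨ (p.2 = q.2 ∧ p.1 < q.1)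

lemma pv_contains_congr {s t : PySem.Set (Int × Int)} (h : ∀ q, q ∈ t ↔ q ∈ s) (z : Int × Int) :
    PySem.Set.contains t z = PySem.Set.contains s z := by
  by_cases hz : z ∈ t
  · rw [(PySem.Set.contains_iff t z).mpr hz, (PySem.Set.contains_iff s z).mpr ((h z).mp hz)]
  · have hz' : z ∉ s := fun hc => hz ((h z).mpr hc)
    rw [Bool.eq_false_iff.mpr (fun hc => hz ((PySem.Set.contains_iff t z).mp hc)),
        Bool.eq_false_iff.mpr (fun hc => hz' ((PySem.Set.contains_iff s z).mp hc))]

lemma pv_width_congr {s t : PySem.Set (Int × Int)} (hmem : ∀ q, q ∈ t ↔ q ∈ s)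
    (x y w : Int) : aWidth t x y w = bWidth s x y w := by
  fun_induction aWidth t x y w with
  | case1 w hc ih =>
    rw [ih]
    conv_rhs => rw [bWidth.eq_def]
    rw [if_pos ((pv_contains_congr hmem _).symm.trans hc)]
  | case2 w hc =>
    conv_rhs => rw [bWidth.eq_def]
    rw [if_neg (fun hcon => hc ((pv_contains_congr hmem _).trans hcon))]

lemma pv_height_congr {s t : PySem.Set (Int × Int)} (hmem : ∀ q, q ∈ t ↔ q ∈ s)
    (x y w h : Int) : aHeight t x y w h = bHeight s x y w h := by
  have hall : ∀ h : Int,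
      (PySem.List.pyRange 0 w).all (fun dx => PySem.Set.contains s (x + dx, y + h)) =
      (PySem.List.pyRange 0 w).all (fun dx => PySem.Set.contains t (x + dx, y + h)) :=
    fun h => congrArg _ (funext fun dx => (pv_contains_congr hmem _).symm)
  fun_induction aHeight t x y w h with
  | case1 h hc ih =>
    obtain ⟨hw, hrow⟩ := hc
    rw [pv_foldl_and_eq, Bool.true_and] at hrow
    rw [ih]
    conv_rhs => rw [bHeight.eq_def]
    rw [if_pos ⟨hw, (hall h).trans hrow⟩]
  | case2 h hc =>
    conv_rhs => rw [bHeight.eq_def]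
    rw [if_neg ?_]
    rintro ⟨hw, hrow⟩
    exact hc ⟨hw, by rw [pv_foldl_and_eq, Bool.true_and, ← hall h]; exact hrow⟩

lemma pv_mem_foldl_discard (l : List (Int × Int)) :
    ∀ (u : PySem.Set (Int × Int)) (q : Int × Int),
      q ∈ l.foldl PySem.Set.discard u ↔ q ∈ u ∧ q ∉ l := by
  induction l with
  | nil => intro u q; simp
  | cons b t ih =>
    intro u q
    rw [List.foldl_cons, ih, PySem.Set.mem_discard]
    simp only [List.mem_cons]
    constructor
    · rintro ⟨⟨hu, hb⟩, ht⟩; exact ⟨hu, by tauto⟩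
    · rintro ⟨hu, h⟩; exact ⟨⟨hu, by tauto⟩, by tauto⟩

lemma pv_nodup_foldl_discard (l : List (Int × Int)) :
    ∀ (u : PySem.Set (Int × Int)), u.Nodup → (l.foldl PySem.Set.discard u).Nodup := by
  induction l with
  | nil => intro u h; exact h
  | cons b t ih => intro u h; exact ih _ (PySem.Set.nodup_discard u b h)

lemma pv_pvStep_keep (x m : Int × Int) (h : pvLL m x ∨ x = m) : pvStep (some m) x = some m := by
  have hcond : (decide (x.2 < m.2) || !decide (m.2 < x.2) && decide (x.1 < m.1)) = false := by
    rw [Bool.eq_false_iff]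
    intro hcon
    simp only [Bool.or_eq_true, Bool.and_eq_true, Bool.not_eq_true', decide_eq_true_eq,
      decide_eq_false_iff_not] at hcon
    rcases h with h | rfl
    · unfold pvLL at h; omega
    · omega
  show (if (decide (x.2 < m.2) || !decide (m.2 < x.2) && decide (x.1 < m.1)) = true then some x else some m) = some m
  rw [hcond]
  simp

lemma pv_pvStep_take (p m : Int × Int) (h : pvLL p m) : pvStep (some m) p = some p := by
  have hcond : (decide (p.2 < m.2) || !decide (m.2 < p.2) && decide (p.1 < m.1)) = true := by
    unfold pvLL at h
    rcases h with h | ⟨h1, h2⟩ <;>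
      simp only [Bool.or_eq_true, Bool.and_eq_true, Bool.not_eq_true', decide_eq_true_eq,
        decide_eq_false_iff_not] <;> omega
  show (if (decide (p.2 < m.2) || !decide (m.2 < p.2) && decide (p.1 < m.1)) = true then some p else some m) = some p
  rw [hcond]
  simp

lemma pv_keep (p : Int × Int) (l : List (Int × Int)) (hl : ∀ q ∈ l, pvLL p q ∨ q = p) :
    l.foldl pvStep (some p) = some p := by
  induction l with
  | nil => rfl
  | cons x t ih =>
    rw [List.foldl_cons, pv_pvStep_keep x p (hl x (by simp))]
    exact ih (fun q hq => hl q (List.mem_cons_of_mem _ hq))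

-- min(u, key=λp.(p.y, p.x)) is p whenever p ∈ u is strictly smallest in reading order
lemma pv_min2_eq (u : List (Int × Int)) (p : Int × Int) (hp : p ∈ u)
    (hmin : ∀ q ∈ u, q ≠ p → pvLL p q) :
    PySem.List.min2? u (fun r => r.2) (fun r => r.1) = some p := by
  rw [pv_min2?_eq_foldl]
  have hall : ∀ q ∈ u, pvLL p q ∨ q = p := fun q hq =>
    if h : q = p then Or.inr h else Or.inl (hmin q hq h)
  clear hmin
  suffices H : ∀ (l : List (Int × Int)) (acc : Option (Int × Int)), p ∈ l →
      (∀ q ∈ l, pvLL p q ∨ q = p) →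
      (acc = none ∨ acc = some p ∨ ∃ m, acc = some m ∧ pvLL p m) →
      l.foldl pvStep acc = some p from H u none hp hall (Or.inl rfl)
  intro l
  induction l with
  | nil => intro acc hp'; cases hp'
  | cons x t ih =>
    intro acc hp' hall' hacc
    rw [List.foldl_cons]
    by_cases hxp : x = p
    · subst hxp
      have hstep : pvStep acc x = some x := by
        rcases hacc with rfl | rfl | ⟨m, rfl, hm⟩
        · rfl
        · exact pv_pvStep_keep x x (Or.inr rfl)
        · exact pv_pvStep_take x m hm
      rw [hstep]
      exact pv_keep x t (fun q hq => hall' q (List.mem_cons_of_mem _ hq))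
    · have hpx : pvLL p x := by
        rcases hall' x (by simp) with h | h
        · exact h
        · exact absurd h hxp
      have hpt : p ∈ t := by
        rcases List.mem_cons.mp hp' with h | h
        · exact absurd h.symm hxp
        · exact h
      apply ih _ hpt (fun q hq => hall' q (List.mem_cons_of_mem _ hq))
      rcases hacc with rfl | rfl | ⟨m, rfl, hm⟩
      · right; right; exact ⟨x, rfl, hpx⟩
      · right; left; exact pv_pvStep_keep x p (Or.inl hpx)
      · by_cases hbm : (decide (x.2 < m.2) || !decide (m.2 < x.2) && decide (x.1 < m.1)) = true
        · right; right
          refine ⟨x, ?_, hpx⟩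
          show (if (decide (x.2 < m.2) || !decide (m.2 < x.2) && decide (x.1 < m.1)) = true then some x else some m) = some x
          exact if_pos hbm
        · right; right
          refine ⟨m, ?_, hm⟩
          show (if (decide (x.2 < m.2) || !decide (m.2 < x.2) && decide (x.1 < m.1)) = true then some x else some m) = some m
          exact if_neg hbm

-- pairwise strict reading order of sorted2's output on distinct inputs
lemma pv_insertBy_pairwise (x : Int × Int) (ys : List (Int × Int))
    (hys : ys.Pairwise pvLL) (hne : ∀ y ∈ ys, y ≠ x) :
    (PySem.List.insertBy (fun a b => decide (a.2 < b.2) || !decide (b.2 < a.2) && decide (a.1 < b.1)) x ys).Pairwise pvLL := by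
  induction ys with
  | nil => simp [PySem.List.insertBy.eq_1]
  | cons y t ih =>
    rw [PySem.List.insertBy.eq_2]
    rcases List.pairwise_cons.mp hys with ⟨hyt, ht⟩
    by_cases hb : (decide (x.2 < y.2) || !decide (y.2 < x.2) && decide (x.1 < y.1)) = true
    · rw [if_pos hb]
      simp only [Bool.or_eq_true, Bool.and_eq_true, Bool.not_eq_true', decide_eq_true_eq,
        decide_eq_false_iff_not] at hb
      have hxy : pvLL x y := by unfold pvLL; omega
      refine List.pairwise_cons.mpr ⟨?_, hys⟩
      intro z hz
      rcases List.mem_cons.mp hz with rfl | hz'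
      · exact hxy
      · have := hyt z hz'
        unfold pvLL at *; omega
    · rw [if_neg hb]
      rw [Bool.not_eq_true, Bool.eq_false_iff] at hb
      refine List.pairwise_cons.mpr
        ⟨?_, ih ht (fun z hz => hne z (List.mem_cons_of_mem _ hz))⟩
      intro z hz
      rcases (PySem.List.insertBy_mem_iff _ _ _ _).mp hz with rfl | hz'
      · -- z = x; need pvLL y x from ¬(x before y) and y ≠ x
        have hyx : y ≠ z := hne y (by simp)
        have hne2 : ¬(y.1 = z.1 ∧ y.2 = z.2) := fun ⟨a, b⟩ => hyx (Prod.ext_iff.mpr ⟨a, b⟩)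
        have hb' : ¬(z.2 < y.2 ∨ (¬ y.2 < z.2 ∧ z.1 < y.1)) := by
          intro hcon
          apply hb
          simp only [Bool.or_eq_true, Bool.and_eq_true, Bool.not_eq_true', decide_eq_true_eq,
            decide_eq_false_iff_not]
          tauto
        unfold pvLL
        omega
      · exact hyt z hz'

lemma pv_foldl_insertBy_pairwise (xs : List (Int × Int)) :
    ∀ acc : List (Int × Int), (acc ++ xs).Nodup → acc.Pairwise pvLL →
    (xs.foldl (fun acc x => PySem.List.insertBy (fun a b => decide (a.2 < b.2) || !decide (b.2 < a.2) && decide (a.1 < b.1)) x acc) acc).Pairwise pvLL := by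
  induction xs with
  | nil => intro acc _ h; exact h
  | cons x t ih =>
    intro acc hnd hpw
    rw [List.foldl_cons]
    have hxacc : x ∉ acc := by
      have := List.disjoint_of_nodup_append hnd
      intro hc; exact this hc (by simp)
    have hperm : (PySem.List.insertBy (fun a b => decide (a.2 < b.2) || !decide (b.2 < a.2) && decide (a.1 < b.1)) x acc).Perm (x :: acc) :=
      PySem.List.insertBy_perm _ _ _
    apply ih
    · have h1 : ((x :: acc) ++ t).Perm (acc ++ x :: t) := by
        simpa using (List.perm_middle (a := x) (l₁ := acc) (l₂ := t)).symm
      exact (((hperm.append_right t).trans h1).symm.nodup hnd)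
    · exact pv_insertBy_pairwise x acc hpw (fun y hy => fun hc => hxacc (hc ▸ hy))

lemma pv_sorted2_pairwise (xs : List (Int × Int)) (hx : xs.Nodup) :
    (PySem.List.sorted2 xs (fun p => p.2) (fun p => p.1)).Pairwise pvLL := by
  unfold PySem.List.sorted2
  simp only [Bool.false_eq_true, if_false]
  exact pv_foldl_insertBy_pairwise xs [] (by simpa) (by simp)

-- main loop equivalence: t is A's unvisited set, s is B's alive set (same members),
-- pts a strictly (y,x)-sorted list containing every member of t
lemma pv_loop_eq (pts : List (Int × Int)) :
    ∀ (s t : PySem.Set (Int × Int)) (r : List (Int × Int × Int × Int)),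
      t.Nodup → (∀ q, q ∈ t ↔ q ∈ s) → (∀ q ∈ t, q ∈ pts) → pts.Pairwise pvLL →
      aLoop t r = bLoop pts s r := by
  induction pts with
  | nil =>
    intro s t r hnd hmem hsub hpw
    have ht : t = [] := List.eq_nil_iff_forall_not_mem.mpr (fun q hq => absurd (hsub q hq) (List.not_mem_nil))
    rw [aLoop.eq_def, if_pos ht, bLoop]
  | cons p rest ih =>
    intro s t r hnd hmem hsub hpw
    obtain ⟨px, py⟩ := p
    rcases List.pairwise_cons.mp hpw with ⟨hprest, hrest⟩
    by_cases hc : (px, py) ∈ s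
    · have hpt : (px, py) ∈ t := (hmem _).mpr hc
      have ht : ¬(t = []) := by rintro rfl; cases hpt
      have hmin : PySem.List.min2? t (fun r => r.2) (fun r => r.1) = some (px, py) := by
        apply pv_min2_eq t (px, py) hpt
        intro q hq hqp
        have hq' : q ∈ rest := by
          rcases List.mem_cons.mp (hsub q hq) with h | h
          · exact absurd h hqp
          · exact h
        exact hprest q hq'
      rw [aLoop.eq_def, if_neg ht]
      rw [bLoop, if_pos ((PySem.Set.contains_iff s _).mpr hc)]
      split
      · rename_i heq
        rw [hmin] at heq; cases heq
      · rename_i xx yy heq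
        rw [hmin] at heq
        rw [Option.some.injEq, Prod.mk.injEq] at heq
        obtain ⟨rfl, rfl⟩ := heq
        show aLoop (aRemove t px py (aWidth t px py 1) (aHeight t px py (aWidth t px py 1) 1))
            (r ++ [(px, py, aWidth t px py 1, aHeight t px py (aWidth t px py 1) 1)]) =
          bLoop rest (bRemove s px py (bWidth s px py 1) (bHeight s px py (bWidth s px py 1) 1))
            (r ++ [(px, py, bWidth s px py 1, bHeight s px py (bWidth s px py 1) 1)])
        have hww : aWidth t px py 1 = bWidth s px py 1 := pv_width_congr hmem px py 1
        have hhh : aHeight t px py (aWidth t px py 1) 1 =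
            bHeight s px py (bWidth s px py 1) 1 := by
          rw [pv_height_congr hmem, hww]
        rw [← hhh, ← hww]
        set w := aWidth t px py 1 with hwdef
        set h := aHeight t px py w 1 with hhdef
        have hw1 : 1 ≤ w := pv_aWidth_ge t px py 1
        have hh1 : 1 ≤ h := pv_aHeight_ge t px py w 1
        set rl := (PySem.List.pyRange 0 h).flatMap
          (fun dy => (PySem.List.pyRange 0 w).map (fun dx => (px + dx, py + dy))) with hrl
        have hremA : ∀ q, q ∈ aRemove t px py w h ↔ q ∈ t ∧ q ∉ rl := by
          intro q; rw [pv_aRemove_eq]; exact pv_mem_foldl_discard rl t q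
        have hremB : ∀ q, q ∈ bRemove s px py w h ↔ q ∈ s ∧ q ∉ rl := by
          intro q; unfold bRemove; exact pv_mem_foldl_discard rl s q
        have hprl : (px, py) ∈ rl := by
          rw [hrl, List.mem_flatMap]
          refine ⟨0, PySem.List.mem_pyRange_one.mpr (by omega), ?_⟩
          rw [List.mem_map]
          exact ⟨0, PySem.List.mem_pyRange_one.mpr (by omega), by simp⟩
        apply ih
        · rw [pv_aRemove_eq]; exact pv_nodup_foldl_discard rl t hnd
        · intro q; rw [hremA, hremB, hmem]
        · intro q hq
          rcases (hremA q).mp hq with ⟨hq1, hq2⟩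
          rcases List.mem_cons.mp (hsub q hq1) with rfl | h
          · exact absurd hprl hq2
          · exact h
        · exact hrest
    · have hpt : (px, py) ∉ t := fun hq => hc ((hmem _).mp hq)
      rw [bLoop, if_neg (fun hcon => hpt ((hmem _).mpr ((PySem.Set.contains_iff s _).mp hcon)))]
      apply ih _ _ _ hnd hmem _ hrest
      intro q hq
      rcases List.mem_cons.mp (hsub q hq) with rfl | h
      · exact absurd hq hpt
      · exact h

-- ===== VERDICT (by name: the statement is the Claim_ definition above) =====
theorem merge_pixels_to_rects_spec : Claim_equal_merge_pixels_to_rects := by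
  intro pixels_coords _
  unfold Spec_merge_pixels_to_rects merge_pixels_to_rects merge_pixels_to_rects_alt
  have hperm : (PySem.List.sorted2 (PySem.Set.ofList pixels_coords) (fun p => p.2) (fun p => p.1)).Perm
      (PySem.Set.ofList pixels_coords) := PySem.List.sorted2_perm _ _ _ _
  apply pv_loop_eq
  · exact PySem.Set.nodup_ofList pixels_coords
  · intro q
    rw [PySem.Set.mem_ofList, PySem.Set.mem_ofList, hperm.mem_iff, PySem.Set.mem_ofList]
  · intro q hq
    exact hperm.mem_iff.mpr hq
  · exact pv_sorted2_pairwise _ (PySem.Set.nodup_ofList pixels_coords)
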